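-- pv_equiv track=rewrite | github.com/yatoyun/atcoder | 234/e.py | f
-- ===== SOURCE A (Python) =====
-- def f(x, next_num) -> int:
--     next_x = [x[0], next_num]
--     diff = int(next_num) - int(x[0])
--     num = int(next_num)
--     for i in range(2, len(x)):
--         num += diff
--         if num > 9 or num < 0:
--             return None
--         next_x.append(num)
--     return int("".join(map(str, next_x)))
-- ===== SOURCE B (Python) =====
-- def f(x, next_num) -> int:
--     a = int(next_num)
--     diff = a - int(x[0])
--     n = len(x) - 2
--     if n > 0:
--         # the continuation terms a+diff, ..., a+diff*n form a monotone arithmetic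
--         # progression, so all lie in 0..9 iff the two endpoints do
--         first, last = a + diff, a + diff * n
--         if min(first, last) < 0 or max(first, last) > 9:
--             return None
--     return int(str(x[0]) + str(next_num) + "".join(str(a + diff * k) for k in range(1, n + 1)))
-- ===== Notes on version B (the rewrite author's own statement) =====
-- stated objective: alternative
-- what changed: Replaces A's stateful increment-check-append loop (running num, growing next_x list, early return mid-scan) with an O(1) validity test of just the two endpoints of the arithmetic progression (all terms lie in 0..9 iff the endpoints do, by monotonicity) followed by a single closed-form string build str(x[0])+str(next_num)+join(str(a+diff*k)); no per-term bounds scan and no accumulated list remain.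
import Mathlib
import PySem

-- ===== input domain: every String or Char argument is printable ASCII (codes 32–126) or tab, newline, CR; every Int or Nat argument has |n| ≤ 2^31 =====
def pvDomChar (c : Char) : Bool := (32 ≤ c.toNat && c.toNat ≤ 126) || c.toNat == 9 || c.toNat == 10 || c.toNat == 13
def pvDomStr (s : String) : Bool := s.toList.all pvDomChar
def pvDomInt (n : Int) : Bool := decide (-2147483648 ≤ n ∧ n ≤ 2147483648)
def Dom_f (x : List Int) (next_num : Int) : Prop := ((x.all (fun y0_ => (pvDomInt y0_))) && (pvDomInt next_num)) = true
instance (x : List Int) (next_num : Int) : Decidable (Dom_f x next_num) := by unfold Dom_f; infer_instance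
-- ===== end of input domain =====

-- B drops A's increment-check-append loop: it validates the whole continuation by an O(1)
-- check of the two endpoints (the terms are a monotone arithmetic progression) and then
-- builds the numeral string in one closed-form pass (objective: alternative).

-- ===== PORT A =====
-- the 'for i in range(2, len(x))' loop: one step per iteration, carrying num and next_x
def fGo (diff : Int) : Nat → Int → List Int → Option (List Int)
  | 0, _, acc => some acc
  | n + 1, num, acc =>
      let num' := num + diff
      if num' > 9 ∨ num' < 0 then none
      else fGo diff n num' (acc ++ [num'])

def f (x : List Int) (next_num : Int) : Option Int :=
  match x with
  | [] => none  -- x[0] raises IndexError; excluded by Pre_f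
  | x0 :: _ =>
    let diff := next_num - x0
    match fGo diff (x.length - 2) next_num [x0, next_num] with
    | none => none
    | some next_x => PySem.Int.ofStr? (PySem.Str.join "" (next_x.map PySem.Int.toStr))

-- ===== PORT B =====
def f_alt (x : List Int) (next_num : Int) : Option Int :=
  match x with
  | [] => none  -- int(x[0]) raises IndexError; excluded by Pre_f
  | x0 :: _ =>
    let diff := next_num - x0
    let n : Int := (x.length : Int) - 2
    -- 'if n > 0: if min(first,last) < 0 or max(first,last) > 9: return None'
    if 0 < n ∧ (min (next_num + diff) (next_num + diff * n) < 0 ∨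
                9 < max (next_num + diff) (next_num + diff * n)) then none
    else
      PySem.Int.ofStr? (PySem.Str.join "" [PySem.Int.toStr x0, PySem.Int.toStr next_num,
        PySem.Str.join "" ((PySem.List.pyRange 1 (n + 1) 1).map
          (fun k => PySem.Int.toStr (next_num + diff * k)))])

-- ===== PRECONDITION & SPEC =====
-- Pre_f excludes exactly the inputs where Python A raises: x = [] (IndexError on x[0]),
-- and next_num < 0 when every continuation term lies in 0..9 (the code then reaches the
-- final int(...) and int("…-…") raises ValueError on the embedded minus sign).
def Pre_f (x : List Int) (next_num : Int) : Prop :=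
  x ≠ [] ∧
  ((∀ k ∈ PySem.List.pyRange 1 ((x.length : Int) - 1) 1,
      0 ≤ next_num + (next_num - x.headI) * k ∧ next_num + (next_num - x.headI) * k ≤ 9) →
    0 ≤ next_num)
instance (x : List Int) (next_num : Int) : Decidable (Pre_f x next_num) := by unfold Pre_f; infer_instance

def pvWitness_f : List Int × Int := ([1, 2, 3], 2)

def Spec_f (x : List Int) (next_num : Int) (out : Option Int) : Prop := out = f_alt x next_num
instance (x : List Int) (next_num : Int) (out : Option Int) : Decidable (Spec_f x next_num out) := by unfold Spec_f; infer_instance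

-- ===== CLAIM (what is proved, stated in full; the proofs are below) =====
def Claim_equal_f : Prop := ∀ (x : List Int) (next_num : Int), Dom_f x next_num → Pre_f x next_num → Spec_f x next_num (f x next_num)

-- ===== LEMMAS AND PROOFS =====

-- A's loop produces exactly the closed-form term list (appended to the accumulator),
-- and returns none exactly when some term falls outside 0..9.
lemma fGo_eq (diff : Int) (n : Nat) (num : Int) (acc : List Int) :
    fGo diff n num acc =
      if ((List.range n).map (fun k : Nat => num + diff * (1 + (k : Int)))).any
          (fun t => t < 0 || t > 9) then none
      else some (acc ++ (List.range n).map (fun k : Nat => num + diff * (1 + (k : Int)))) := by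
  induction n generalizing num acc with
  | zero => simp [fGo]
  | succ n ih =>
      rw [List.range_succ_eq_map]
      simp only [fGo, List.map_cons, List.map_map, List.any_cons]
      by_cases h : num + diff > 9 ∨ num + diff < 0
      · have hb : (num + diff * (1 + ((0 : Nat) : Int)) < 0 || num + diff * (1 + ((0 : Nat) : Int)) > 9) = true := by
          simp only [Nat.cast_zero]; rw [Bool.or_eq_true]; rcases h with h | h
          · right; simpa using by omega
          · left; simpa using by omega
        simp only [if_pos h]
        rw [hb]; simp
      · have hb : (num + diff * (1 + ((0 : Nat) : Int)) < 0 || num + diff * (1 + ((0 : Nat) : Int)) > 9) = false := by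
          push Not at h
          simp only [Nat.cast_zero]; rw [Bool.or_eq_false_iff]
          constructor <;> simpa using by omega
        simp only [if_neg h]
        rw [ih, hb]
        have hf : (List.range n).map ((fun k : Nat => num + diff * (1 + (k : Int))) ∘ Nat.succ)
            = (List.range n).map (fun k : Nat => (num + diff) + diff * (1 + (k : Int))) := by
          apply List.map_congr_left
          intro a _
          simp only [Function.comp]
          push_cast
          ring
        rw [hf]
        norm_num

-- joining with the empty separator is flattening
lemma join_nil_eq_flatten (l : List (List Char)) : PySem.Chars.join [] l = l.flatten := by
  induction l with
  | nil => simp [PySem.Chars.join_nil]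
  | cons p rest ih =>
      cases rest with
      | nil => simp [PySem.Chars.join_singleton]
      | cons q rs => rw [PySem.Chars.join_cons_cons]; simp [ih]

-- the terms of a monotone arithmetic progression all lie in 0..9 iff its endpoints do
lemma any_iff_endpoints (a d : Int) (m : Nat) (hm : 0 < m) :
    (((List.range m).map (fun k : Nat => a + d * (1 + (k : Int)))).any
        (fun t => t < 0 || t > 9) = true)
    ↔ (min (a + d) (a + d * (m : Int)) < 0 ∨ 9 < max (a + d) (a + d * (m : Int))) := by
  simp only [List.any_map, List.any_eq_true, List.mem_range, Function.comp,
    Bool.or_eq_true, decide_eq_true_eq]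
  constructor
  · rintro ⟨k, hk, hbad⟩
    have hk1 : (1 : Int) ≤ 1 + (k : Int) := by omega
    have hkm : (1 : Int) + (k : Int) ≤ (m : Int) := by omega
    rcases le_or_gt 0 d with hd | hd
    · have h1 : a + d ≤ a + d * (1 + (k : Int)) := by nlinarith
      have h2 : a + d * (1 + (k : Int)) ≤ a + d * (m : Int) := by nlinarith
      rcases hbad with hb | hb
      · left; calc min (a + d) (a + d * (m : Int)) ≤ a + d := min_le_left _ _
          _ ≤ a + d * (1 + (k : Int)) := h1
          _ < 0 := hb
      · right; calc (9 : Int) < a + d * (1 + (k : Int)) := hb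
          _ ≤ a + d * (m : Int) := h2
          _ ≤ max (a + d) (a + d * (m : Int)) := le_max_right _ _
    · have h1 : a + d * (m : Int) ≤ a + d * (1 + (k : Int)) := by nlinarith
      have h2 : a + d * (1 + (k : Int)) ≤ a + d := by nlinarith
      rcases hbad with hb | hb
      · left; calc min (a + d) (a + d * (m : Int)) ≤ a + d * (m : Int) := min_le_right _ _
          _ ≤ a + d * (1 + (k : Int)) := h1
          _ < 0 := hb
      · right; calc (9 : Int) < a + d * (1 + (k : Int)) := hb
          _ ≤ a + d := h2
          _ ≤ max (a + d) (a + d * (m : Int)) := le_max_left _ _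
  · intro h
    have hfirst : a + d = a + d * (1 + ((0 : Nat) : Int)) := by push_cast; ring
    have hlast : a + d * (m : Int) = a + d * (1 + ((m - 1 : Nat) : Int)) := by
      have : ((m - 1 : Nat) : Int) = (m : Int) - 1 := by omega
      rw [this]; ring
    rcases h with h | h
    · rcases min_cases (a + d) (a + d * (m : Int)) with ⟨heq, _⟩ | ⟨heq, _⟩ <;> rw [heq] at h
      · exact ⟨0, hm, Or.inl (hfirst ▸ h)⟩
      · exact ⟨m - 1, by omega, Or.inl (hlast ▸ h)⟩
    · rcases max_cases (a + d) (a + d * (m : Int)) with ⟨heq, _⟩ | ⟨heq, _⟩ <;> rw [heq] at h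
      · exact ⟨0, hm, Or.inr (hfirst ▸ h)⟩
      · exact ⟨m - 1, by omega, Or.inr (hlast ▸ h)⟩

-- B's comprehension over range(1, n+1) stringifies A's loop's term list
lemma termstr_eq (a d : Int) (m : Nat) :
    (PySem.List.pyRange 1 ((m : Int) + 1) 1).map (fun k => PySem.Int.toStr (a + d * k))
      = ((List.range m).map (fun k : Nat => a + d * (1 + (k : Int)))).map PySem.Int.toStr := by
  rw [PySem.List.pyRange_one]
  have : ((m : Int) + 1 - 1).toNat = m := by omega
  rw [this, List.map_map, List.map_map]
  apply List.map_congr_left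
  intro k _
  simp [Function.comp]

-- A's joined string and B's joined string are the same string
lemma strings_eq (x0 a : Int) (terms : List Int) :
    PySem.Str.join "" ((x0 :: a :: terms).map PySem.Int.toStr)
      = PySem.Str.join "" [PySem.Int.toStr x0, PySem.Int.toStr a,
          PySem.Str.join "" (terms.map PySem.Int.toStr)] := by
  apply String.toList_inj.mp
  rw [PySem.Str.toList_join, PySem.Str.toList_join]
  simp only [List.map_cons, List.map_map, String.toList_empty]
  rw [join_nil_eq_flatten, join_nil_eq_flatten]
  simp [PySem.Str.toList_join, join_nil_eq_flatten, List.map_map]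

-- the two ports agree on EVERY input (Pre_f is only about where the Python A raises)
lemma f_eq_f_alt (x : List Int) (next_num : Int) : f x next_num = f_alt x next_num := by
  cases x with
  | nil => rfl
  | cons x0 rest =>
      simp only [f, f_alt]
      set d := next_num - x0 with hd
      set m : Nat := (x0 :: rest).length - 2 with hmdef
      rw [fGo_eq]
      by_cases hm : 0 < m
      · have hM : ((x0 :: rest).length : Int) - 2 = (m : Int) := by
          simp only [List.length_cons] at hmdef ⊢; omega
        rw [hM, termstr_eq next_num d m]
        by_cases hbad : (((List.range m).map (fun k : Nat => next_num + d * (1 + (k : Int)))).any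
            (fun t => t < 0 || t > 9)) = true
        · rw [if_pos hbad,
            if_pos ⟨by exact_mod_cast hm, (any_iff_endpoints next_num d m hm).mp hbad⟩]
        · rw [if_neg hbad, if_neg (by
            rintro ⟨-, hcond⟩
            exact hbad ((any_iff_endpoints next_num d m hm).mpr hcond))]
          simp only [List.cons_append, List.nil_append]
          rw [strings_eq, List.map_map]
      · have hm0 : m = 0 := by omega
        have hn0 : ((x0 :: rest).length : Int) - 2 ≤ 0 := by
          simp only [List.length_cons] at hmdef ⊢; omega
        rw [hm0]
        simp only [List.range_zero, List.map_nil, List.any_nil, Bool.false_eq_true, if_false]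
        rw [if_neg (by rintro ⟨h, -⟩; omega)]
        have hterms : (PySem.List.pyRange 1 (((x0 :: rest).length : Int) - 2 + 1) 1).map
            (fun k => PySem.Int.toStr (next_num + d * k)) = [] := by
          rw [PySem.List.pyRange_one]
          have : ((((x0 :: rest).length : Int) - 2 + 1) - 1).toNat = 0 := by omega
          rw [this]; simp
        rw [hterms]
        have h := strings_eq x0 next_num []
        simp only [List.map_nil, List.map_cons, List.append_nil] at h ⊢
        exact congrArg PySem.Int.ofStr? h

-- ===== VERDICT (by name: the statement is the Claim_ definition above) =====
theorem f_spec : Claim_equal_f := by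
  intro x next_num _ _
  exact f_eq_f_alt x next_num
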